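-- pv_equiv track=rewrite | github.com/Bhanuprasad17/DSA | SURAM_BHANUPRASAD/Problem-3.py | conditional_odd_series
-- ===== SOURCE A (Python) =====
-- def conditional_odd_series(a):
--     result = []
--     num = 1
--     for i in range(1, a + 1):
--         if a % 2 != 0:
--             result.append(num)
--             num += 2
--         elif i % 2 != 0:
--             result.append(num)
--             num += 2
--     return result
-- ===== SOURCE B (Python) =====
-- def conditional_odd_series(a):
--     count = a if a % 2 != 0 else a // 2
--     return list(range(1, 2 * count, 2))
-- ===== Notes on version B (the rewrite author's own statement) =====
-- stated objective: simpler
-- what changed: Replaces the loop with per-iteration parity branch and num accumulator by a closed-form element count (a if a is odd else a//2) and a single stepped range construction.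
import Mathlib
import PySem

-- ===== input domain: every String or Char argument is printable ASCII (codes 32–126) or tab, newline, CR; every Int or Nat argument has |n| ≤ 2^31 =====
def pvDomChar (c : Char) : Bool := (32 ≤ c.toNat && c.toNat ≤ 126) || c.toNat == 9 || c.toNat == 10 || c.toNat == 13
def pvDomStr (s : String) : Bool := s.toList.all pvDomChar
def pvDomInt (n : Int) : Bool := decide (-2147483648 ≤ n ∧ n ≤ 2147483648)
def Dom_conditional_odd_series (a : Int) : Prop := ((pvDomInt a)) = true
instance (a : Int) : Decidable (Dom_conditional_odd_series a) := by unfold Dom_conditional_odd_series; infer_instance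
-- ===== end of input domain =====

-- B replaces A's loop with per-iteration parity branch by a closed-form element count and one stepped range (simpler).


-- ===== PORT A =====
-- literal port: fold over range(1, a+1) carrying the state (result, num)
def conditional_odd_series (a : Int) : List Int :=
  ((PySem.List.pyRange 1 (a + 1) 1).foldl
    (fun (st : List Int × Int) i =>
      if PySem.Int.mod a 2 ≠ 0 then (st.1 ++ [st.2], st.2 + 2)
      else if PySem.Int.mod i 2 ≠ 0 then (st.1 ++ [st.2], st.2 + 2)
      else st)
    ([], 1)).1

-- ===== PORT B =====
def conditional_odd_series_alt (a : Int) : List Int :=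
  let count : Int := if PySem.Int.mod a 2 ≠ 0 then a else PySem.Int.floordiv a 2
  PySem.List.pyRange 1 (2 * count) 2

-- ===== PRECONDITION & SPEC =====
def Spec_conditional_odd_series (a : Int) (out : List Int) : Prop := out = conditional_odd_series_alt a
instance (a : Int) (out : List Int) : Decidable (Spec_conditional_odd_series a out) := by unfold Spec_conditional_odd_series; infer_instance

-- ===== CLAIM (what is proved, stated in full; the proofs are below) =====
def Claim_equal_conditional_odd_series : Prop := ∀ (a : Int), Dom_conditional_odd_series a → Spec_conditional_odd_series a (conditional_odd_series a)

-- ===== LEMMAS AND PROOFS =====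

-- A's loop body with the outer parity test on `a` already decided (odd resp. even a).
def pvBodyOdd (st : List Int × Int) (_i : Int) : List Int × Int := (st.1 ++ [st.2], st.2 + 2)

def pvBodyEven (st : List Int × Int) (i : Int) : List Int × Int :=
  if PySem.Int.mod i 2 ≠ 0 then (st.1 ++ [st.2], st.2 + 2) else st

lemma fmod_two_eq (a : Int) : PySem.Int.mod a 2 = a % 2 := by
  simp [PySem.Int.mod, Int.fmod_eq_emod]

lemma fdiv_two_eq (a : Int) : PySem.Int.floordiv a 2 = a / 2 := by
  simp [PySem.Int.floordiv, Int.fdiv_eq_ediv]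

-- odd a: every iteration appends
lemma foldl_bodyOdd (L : List Int) (r : List Int) (n : Int) :
    L.foldl pvBodyOdd (r, n) =
      (r ++ (List.range L.length).map (fun k : Nat => n + 2 * (k : Int)),
        n + 2 * L.length) := by
  induction L generalizing r n with
  | nil => simp
  | cons x xs ih =>
      simp only [List.foldl_cons, pvBodyOdd, ih, List.length_cons, Prod.mk.injEq]
      constructor
      · rw [List.append_assoc, List.range_succ_eq_map, List.map_cons, List.map_map]
        have hmap : List.map ((fun k : Nat => n + 2 * (k : Int)) ∘ Nat.succ) (List.range xs.length)
            = List.map (fun k : Nat => n + 2 + 2 * (k : Int)) (List.range xs.length) := by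
          apply List.map_congr_left
          intro k hk
          simp only [Function.comp_apply, Nat.succ_eq_add_one]
          push_cast
          ring
        rw [hmap]
        simp
      · push_cast; ring

-- even a: the loop appends exactly at odd i; state after processing i = 1..b
lemma foldl_bodyEven (b : Nat) :
    (PySem.List.pyRange 1 ((b : Int) + 1) 1).foldl pvBodyEven ([], 1) =
      ((List.range ((b + 1) / 2)).map (fun k : Nat => 1 + 2 * (k : Int)),
        1 + 2 * (((b + 1) / 2 : Nat) : Int)) := by
  induction b with
  | zero => simp [PySem.List.pyRange_one_eq_nil (le_refl (1:Int))]
  | succ b ih =>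
      have h1 : (1 : Int) ≤ (b : Int) + 1 := by omega
      rw [show ((b + 1 : Nat) : Int) + 1 = ((b : Int) + 1) + 1 by push_cast; ring,
          PySem.List.pyRange_one_succ_right h1, List.foldl_append, ih]
      simp only [List.foldl_cons, List.foldl_nil, pvBodyEven, fmod_two_eq]
      rcases Nat.even_or_odd b with hb | hb
      · -- b even, i = b+1 odd: append
        obtain ⟨m, hm⟩ := hb
        have hmod : ((b : Int) + 1) % 2 ≠ 0 := by omega
        rw [if_pos hmod]
        have hc : (b + 1 + 1) / 2 = (b + 1) / 2 + 1 := by omega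
        simp only [Prod.mk.injEq]
        constructor
        · rw [hc, List.range_succ, List.map_append]
          simp
        · rw [hc]; push_cast; ring
      · -- b odd, i = b+1 even: skip
        obtain ⟨m, hm⟩ := hb
        have hmod : ¬ ((b : Int) + 1) % 2 ≠ 0 := by omega
        rw [if_neg hmod]
        have hc : (b + 1 + 1) / 2 = (b + 1) / 2 := by omega
        rw [hc]

lemma body_eq_odd (a : Int) (h : PySem.Int.mod a 2 ≠ 0) :
    (fun (st : List Int × Int) i =>
      if PySem.Int.mod a 2 ≠ 0 then (st.1 ++ [st.2], st.2 + 2)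
      else if PySem.Int.mod i 2 ≠ 0 then (st.1 ++ [st.2], st.2 + 2)
      else st) = pvBodyOdd := by
  funext st i; rw [if_pos h]; rfl

lemma body_eq_even (a : Int) (h : PySem.Int.mod a 2 = 0) :
    (fun (st : List Int × Int) i =>
      if PySem.Int.mod a 2 ≠ 0 then (st.1 ++ [st.2], st.2 + 2)
      else if PySem.Int.mod i 2 ≠ 0 then (st.1 ++ [st.2], st.2 + 2)
      else st) = pvBodyEven := by
  funext st i; rw [if_neg (not_not_intro h)]; rfl

-- B's stepped range as a map over List.range
lemma alt_eq (c : Int) :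
    PySem.List.pyRange 1 (2 * c) 2 =
      (List.range (if (1:Int) < 2 * c then ((2 * c - 1 + 2 - 1) / 2).toNat else 0)).map
        (fun k : Nat => 1 + 2 * (k : Int)) := by
  rw [PySem.List.pyRange_of_pos 1 (2 * c) (by norm_num : (0:Int) < 2)]

-- ===== VERDICT (by name: the statement is the Claim_ definition above) =====
theorem conditional_odd_series_spec : Claim_equal_conditional_odd_series := by
  intro a _
  unfold Spec_conditional_odd_series conditional_odd_series conditional_odd_series_alt
  by_cases h : PySem.Int.mod a 2 ≠ 0
  · -- a odd
    rw [body_eq_odd a h]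
    simp only [if_pos h]
    rw [fmod_two_eq] at h
    by_cases ha : 0 < a
    · rw [foldl_bodyOdd, alt_eq]
      have hlen : (PySem.List.pyRange 1 (a + 1) 1).length = a.toNat := by
        rw [PySem.List.length_pyRange_one]; congr 1; omega
      rw [hlen, if_pos (by omega : (1:Int) < 2 * a)]
      have h2 : ((2 * a - 1 + 2 - 1) / 2).toNat = a.toNat := by omega
      rw [h2]
      simp
    · rw [PySem.List.pyRange_one_eq_nil (by omega : a + 1 ≤ 1), alt_eq,
          if_neg (by omega : ¬ (1:Int) < 2 * a)]
      simp
  · -- a even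
    rw [not_not] at h
    rw [body_eq_even a h]
    have hcount : (if PySem.Int.mod a 2 ≠ 0 then a else PySem.Int.floordiv a 2) = a / 2 := by
      rw [if_neg (not_not_intro h), fdiv_two_eq]
    rw [hcount]
    rw [fmod_two_eq] at h
    by_cases ha : 0 < a
    · have key := foldl_bodyEven a.toNat
      rw [show a + 1 = (a.toNat : Int) + 1 by omega, key, alt_eq,
          if_pos (by omega : (1:Int) < 2 * (a / 2))]
      have hc1 : ((2 * (a / 2) - 1 + 2 - 1) / 2).toNat = (a / 2).toNat := by omega
      have hc2 : (a.toNat + 1) / 2 = (a / 2).toNat := by omega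
      rw [hc1, hc2]
    · rw [PySem.List.pyRange_one_eq_nil (by omega : a + 1 ≤ 1)]
      simp only [List.foldl_nil]
      rw [alt_eq, if_neg (by omega : ¬ (1:Int) < 2 * (a / 2))]
      simp
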